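-- pv_equiv track=rewrite | github.com/TruongHuynhTrungNghia/AnnieLearnPython | ontap3_bai9.py | sumMax
-- ===== SOURCE A (Python) =====
-- def sumMax(item):  # 3n + 2 -> O(n) = n
--     sequence = 0
--     sequenceMax = 0
--     totalMax = 0
--     total = 0
--     for v in item:  # n + 1
--         if v >= 0:
--             sequence += 1
--             total += v
--         else:
--             if total > totalMax:  # 2n
--                 totalMax = total
--                 sequenceMax = sequence
--             sequence = 0
--             total = 0
--     if total > totalMax:  # 1
--         sequenceMax = sequence
--
--     return sequenceMax
-- ===== SOURCE B (Python) =====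
-- def _runs(item):
--     """Split item into its maximal runs of nonnegative values, as (sum, length) pairs."""
--     runs = []
--     i = 0
--     n = len(item)
--     while i < n:
--         if item[i] < 0:
--             i += 1
--         else:
--             k = i + 1
--             while k < n and item[k] >= 0:
--                 k += 1
--             runs.append((sum(item[i:k]), k - i))
--             i = k
--     return runs
--
--
-- def sumMax(item):
--     best_sum = 0
--     best_len = 0
--     for s, l in _runs(item):
--         if s > best_sum:
--             best_sum, best_len = s, l
--     return best_len
-- ===== Notes on version B (the rewrite author's own statement) =====
-- stated objective: alternative
-- what changed: B first splits the input into maximal runs of nonnegative values as (sum, length) pairs by recursive splitting, then a separate pass picks the length of the first run with strictly greatest positive sum, instead of A's single pass over elements carrying four pieces of loop state.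
import Mathlib
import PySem

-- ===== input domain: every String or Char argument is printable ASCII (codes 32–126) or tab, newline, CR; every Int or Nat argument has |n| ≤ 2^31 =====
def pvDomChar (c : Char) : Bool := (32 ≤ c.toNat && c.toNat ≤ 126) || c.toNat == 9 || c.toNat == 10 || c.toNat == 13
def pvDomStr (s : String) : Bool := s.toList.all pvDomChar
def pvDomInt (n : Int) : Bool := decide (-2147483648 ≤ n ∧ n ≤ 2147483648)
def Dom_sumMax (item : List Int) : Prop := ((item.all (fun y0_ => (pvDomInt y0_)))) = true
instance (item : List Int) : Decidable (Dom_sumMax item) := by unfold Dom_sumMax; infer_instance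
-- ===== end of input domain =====

-- B splits the list into maximal nonnegative runs first, then scans the (sum, length) pairs; same result as A's one-pass four-variable loop.

-- ===== PORT A =====
-- state = (sequence, sequenceMax, totalMax, total), exactly A's four variables
def sumMax (item : List Int) : Int :=
  let st := item.foldl (fun (st : Int × Int × Int × Int) v =>
      if v ≥ 0 then (st.1 + 1, st.2.1, st.2.2.1, st.2.2.2 + v)
      else if st.2.2.2 > st.2.2.1 then (0, st.1, st.2.2.2, 0)
      else (0, st.2.1, st.2.2.1, 0))
    (0, 0, 0, 0)
  if st.2.2.2 > st.2.2.1 then st.1 else st.2.1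

-- ===== PORT B =====
-- _runs: the Python while loop computes the length of the maximal nonnegative prefix,
-- item[:k] / item[k:] are that prefix and the rest (takeWhile / dropWhile of 0 ≤ ·).
def pvRuns : List Int → List (Int × Int)
  | [] => []
  | v :: t =>
    if v < 0 then pvRuns t
    else
      ((v :: t.takeWhile (fun x => decide (0 ≤ x))).sum,
       ((v :: t.takeWhile (fun x => decide (0 ≤ x))).length : Int))
        :: pvRuns (t.dropWhile (fun x => decide (0 ≤ x)))
termination_by l => l.length
decreasing_by
  · simp
  · simpa using Nat.lt_succ_of_le (List.length_dropWhile_le _ _)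

def sumMax_alt (item : List Int) : Int :=
  ((pvRuns item).foldl (fun (st : Int × Int) r => if r.1 > st.1 then r else st) (0, 0)).2

-- ===== PRECONDITION & SPEC =====
def Spec_sumMax (item : List Int) (out : Int) : Prop := out = sumMax_alt item
instance (item : List Int) (out : Int) : Decidable (Spec_sumMax item out) := by unfold Spec_sumMax; infer_instance

-- ===== CLAIM (what is proved, stated in full; the proofs are below) =====
def Claim_equal_sumMax : Prop := ∀ (item : List Int), Dom_sumMax item → Spec_sumMax item (sumMax item)

-- ===== LEMMAS AND PROOFS =====

-- A's loop body and the final read-out, named for the proofs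
def pvFA (st : Int × Int × Int × Int) (v : Int) : Int × Int × Int × Int :=
  if v ≥ 0 then (st.1 + 1, st.2.1, st.2.2.1, st.2.2.2 + v)
  else if st.2.2.2 > st.2.2.1 then (0, st.1, st.2.2.2, 0)
  else (0, st.2.1, st.2.2.1, 0)

def pvFin (st : Int × Int × Int × Int) : Int := if st.2.2.2 > st.2.2.1 then st.1 else st.2.1

-- B's best-run step
def pvG (st : Int × Int) (r : Int × Int) : Int × Int := if r.1 > st.1 then r else st

-- runs of t with a partial run (tot, seq) already open and merged into the first run
def pvRunsC (tot seq : Int) (t : List Int) : List (Int × Int) :=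
  (tot + (t.takeWhile (fun x => decide (0 ≤ x))).sum,
   seq + ((t.takeWhile (fun x => decide (0 ≤ x))).length : Int))
    :: pvRuns (t.dropWhile (fun x => decide (0 ≤ x)))

lemma pv_aux (t : List Int) (totMax seqMax : Int) (h : 0 ≤ totMax) :
    ((pvRunsC 0 0 t).foldl pvG (totMax, seqMax)).2 = ((pvRuns t).foldl pvG (totMax, seqMax)).2 := by
  cases t with
  | nil =>
    simp [pvRunsC, pvRuns, pvG, not_lt.mpr h]
  | cons v t =>
    by_cases hv : 0 ≤ v
    · have : pvRunsC 0 0 (v :: t) = pvRuns (v :: t) := by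
        simp [pvRunsC, pvRuns, hv, not_lt.mpr hv]
      rw [this]
    · have hneg : v < 0 := lt_of_not_ge hv
      have h1 : pvRunsC 0 0 (v :: t) = (0, 0) :: pvRuns t := by
        simp [pvRunsC, hv, pvRuns, hneg]
      have h2 : pvRuns (v :: t) = pvRuns t := by
        simp [pvRuns, hneg]
      rw [h1, h2, List.foldl_cons]
      have hg : pvG (totMax, seqMax) (0, 0) = (totMax, seqMax) := by
        simp [pvG, not_lt.mpr h]
      rw [hg]

lemma pv_main (t : List Int) : ∀ seq tot seqMax totMax : Int, 0 ≤ totMax → 0 ≤ tot →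
    pvFin (t.foldl pvFA (seq, seqMax, totMax, tot))
      = ((pvRunsC tot seq t).foldl pvG (totMax, seqMax)).2 := by
  induction t with
  | nil =>
    intro seq tot seqMax totMax hM hT
    simp [pvFin, pvRunsC, pvRuns, pvG]
    split <;> simp
  | cons v t ih =>
    intro seq tot seqMax totMax hM hT
    by_cases hv : 0 ≤ v
    · have hstep : pvFA (seq, seqMax, totMax, tot) v = (seq + 1, seqMax, totMax, tot + v) := by
        simp [pvFA, hv]
      rw [List.foldl_cons, hstep, ih (seq + 1) (tot + v) seqMax totMax hM (by omega)]
      have : pvRunsC tot seq (v :: t) = pvRunsC (tot + v) (seq + 1) t := by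
        simp [pvRunsC, hv]
        constructor <;> ring
      rw [this]
    · have hneg : v < 0 := lt_of_not_ge hv
      have h1 : pvRunsC tot seq (v :: t) = (tot, seq) :: pvRuns t := by
        simp [pvRunsC, hv, pvRuns, hneg]
      rw [List.foldl_cons, h1, List.foldl_cons]
      by_cases hgt : tot > totMax
      · have hstep : pvFA (seq, seqMax, totMax, tot) v = (0, seq, tot, 0) := by
          simp [pvFA, not_le.mpr hneg, hgt]
        have hg : pvG (totMax, seqMax) (tot, seq) = (tot, seq) := by simp [pvG, hgt]
        rw [hstep, hg, ih 0 0 seq tot (by omega) le_rfl, pv_aux t tot seq (by omega)]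
      · have hstep : pvFA (seq, seqMax, totMax, tot) v = (0, seqMax, totMax, 0) := by
          simp [pvFA, not_le.mpr hneg, hgt]
        have hg : pvG (totMax, seqMax) (tot, seq) = (totMax, seqMax) := by simp [pvG, hgt]
        rw [hstep, hg, ih 0 0 seqMax totMax hM le_rfl, pv_aux t totMax seqMax hM]

-- ===== VERDICT (by name: the statement is the Claim_ definition above) =====
theorem sumMax_spec : Claim_equal_sumMax := by
  intro item _
  show sumMax item = sumMax_alt item
  have hA : sumMax item = pvFin (item.foldl pvFA (0, 0, 0, 0)) := rfl
  have hB : sumMax_alt item = ((pvRuns item).foldl pvG (0, 0)).2 := rfl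
  rw [hA, hB, pv_main item 0 0 0 0 le_rfl le_rfl, pv_aux item 0 0 le_rfl]
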